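-- pv_equiv track=rewrite | github.com/achonic/FZU22SEWork | 112000927/MainSpider.py | GetTheCases
-- ===== SOURCE A (Python) =====
-- def GetTheCases(CasesText, province, LocalcasesNum):
--     CasesNumber = ""
--     TempPro = ""
--
--     prolen = len(province)
--     textlen = len(CasesText)
--
--     #          遍历文本 找出新增确诊人数
--     for i in range(0, textlen - prolen + 1):
--         for j in range(i, i + prolen):
--             TempPro += CasesText[j]
--         if TempPro == province:  # 如果当前字符串与所要查询的省份匹配
--             i += prolen  # 将下标指向数字
--             if i < textlen:
--                 while CasesText[i] >= '0' and CasesText[i] <= '9':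
--                     CasesNumber += CasesText[i]
--                     i += 1
--             if CasesNumber == "":
--                 CasesNumber = LocalcasesNum
--             break
--         TempPro = ""
--     return CasesNumber  # 返回该省的当天新增确诊人数
-- ===== SOURCE B (Python) =====
-- def GetTheCases(CasesText, province, LocalcasesNum):
--     # locate the first occurrence with str.find, then read the digits that follow
--     i = CasesText.find(province)
--     if i == -1:
--         return ""
--     num = ""
--     for c in CasesText[i + len(province):]:
--         if not c.isdigit():
--             break
--         num += c
--     return num or LocalcasesNum
-- ===== Notes on version B (the rewrite author's own statement) =====
-- stated objective: faster
-- what changed: A rebuilds and compares a fresh length-m window by character-wise concatenation at every index (O(n*m) search); B calls str.find once for the first occurrence and then takes the digits that follow in a single pass.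
-- outside the precondition, e.g. on GetTheCases('ab12', 'ab', ''): A raises IndexError, B returns '12'
-- crash fix: When province occurs in CasesText and the (nonempty) rest of the text after its first occurrence is all digits, A's digit loop runs past the end and raises IndexError; B returns those digits. — e.g. on GetTheCases("ab12", "ab", ""): A raises IndexError, B returns "12"
import Mathlib
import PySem

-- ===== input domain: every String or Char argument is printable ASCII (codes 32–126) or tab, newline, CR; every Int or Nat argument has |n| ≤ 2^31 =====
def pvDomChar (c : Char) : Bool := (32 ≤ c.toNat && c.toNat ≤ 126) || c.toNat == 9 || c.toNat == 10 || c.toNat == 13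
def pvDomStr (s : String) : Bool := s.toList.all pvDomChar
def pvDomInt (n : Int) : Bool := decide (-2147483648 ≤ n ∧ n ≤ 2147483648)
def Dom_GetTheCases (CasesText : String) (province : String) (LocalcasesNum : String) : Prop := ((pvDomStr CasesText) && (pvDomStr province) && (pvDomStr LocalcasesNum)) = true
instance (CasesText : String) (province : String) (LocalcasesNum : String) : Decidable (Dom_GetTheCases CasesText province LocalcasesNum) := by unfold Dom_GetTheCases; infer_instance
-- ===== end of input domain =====

-- B replaces A's quadratic hand-rolled substring search (rebuild+compare a window at every index)
-- by str.find for the first occurrence followed by one scan over the trailing digits (objective: faster).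

-- ===== PORT A =====
-- inner loop 'for j in range(i, i+prolen): TempPro += CasesText[j]': indices are always in
-- range inside the outer loop's range, so getD's default is never used.
def pvBuildA (cs : List Char) (i : Nat) : Nat → List Char
  | 0 => []
  | n + 1 => cs.getD i ' ' :: pvBuildA cs (i + 1) n

-- 'while CasesText[i] >= '0' and CasesText[i] <= '9': …': when the index runs past the end
-- Python raises IndexError; there the port stops instead — exactly those inputs are outside Pre_.
def pvScanA (cs : List Char) (j : Nat) : List Char :=
  if h : j < cs.length then
    if '0' ≤ cs[j] ∧ cs[j] ≤ '9' then cs[j] :: pvScanA cs (j + 1) else []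
  else []
termination_by cs.length - j

-- the outer 'for i in range(0, textlen - prolen + 1)' with its break, fuel = number of iterations left
def pvOuterA (cs ps : List Char) (loc : String) (i : Nat) : Nat → String
  | 0 => ""
  | fuel + 1 =>
    if pvBuildA cs i ps.length = ps then
      let k := i + ps.length
      let num := if k < cs.length then pvScanA cs k else []
      if num = [] then loc else String.ofList num
    else pvOuterA cs ps loc (i + 1) fuel

def GetTheCases (CasesText : String) (province : String) (LocalcasesNum : String) : String :=
  let cs := CasesText.toList
  let ps := province.toList
  pvOuterA cs ps LocalcasesNum 0 (cs.length + 1 - ps.length)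

-- ===== PORT B =====
-- 'for c in CasesText[i+len(province):]: if not c.isdigit(): break; num += c'
def pvScanB : List Char → List Char
  | [] => []
  | c :: rest => if PySem.Chars.isdigit c then c :: pvScanB rest else []

def GetTheCases_alt (CasesText : String) (province : String) (LocalcasesNum : String) : String :=
  let i := PySem.Str.find CasesText province
  if i = -1 then ""
  else
    -- CasesText[i + len(province):] with a nonnegative start is drop (clamped past the end, as in Python)
    let num := pvScanB (CasesText.toList.drop (i.toNat + province.toList.length))
    if num = [] then LocalcasesNum else String.ofList num

-- ===== PRECONDITION & SPEC =====
-- Pre_ excludes exactly the inputs on which A raises IndexError: province occurs in CasesText and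
-- everything after its first occurrence (nonempty) consists of digits, so A's digit loop runs off the end.
def Pre_GetTheCases (CasesText : String) (province : String) (LocalcasesNum : String) : Prop :=
  ¬ (PySem.Str.find CasesText province ≠ -1 ∧
     (PySem.Str.find CasesText province).toNat + province.toList.length < CasesText.toList.length ∧
     (CasesText.toList.drop ((PySem.Str.find CasesText province).toNat + province.toList.length)).all
       (fun c => decide ('0' ≤ c) && decide (c ≤ '9')) = true)
instance (CasesText : String) (province : String) (LocalcasesNum : String) : Decidable (Pre_GetTheCases CasesText province LocalcasesNum) := by unfold Pre_GetTheCases; infer_instance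

def pvWitness_GetTheCases : String × String × String := ("ab 12", "b", "x")

-- On inputs where province occurs and only digits follow it to the end of the text, A raises
-- IndexError while B returns those digits.
def Raises_GetTheCases (CasesText : String) (province : String) (LocalcasesNum : String) : Prop :=
  PySem.Str.find CasesText province ≠ -1 ∧
  (PySem.Str.find CasesText province).toNat + province.toList.length < CasesText.toList.length ∧
  (CasesText.toList.drop ((PySem.Str.find CasesText province).toNat + province.toList.length)).all
    (fun c => decide ('0' ≤ c) && decide (c ≤ '9')) = true
instance (CasesText : String) (province : String) (LocalcasesNum : String) : Decidable (Raises_GetTheCases CasesText province LocalcasesNum) := by unfold Raises_GetTheCases; infer_instance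
def pvRaiseWitness_GetTheCases : String × String × String := ("ab12", "ab", "")
def pvRaiseWitnessOut_GetTheCases : String := "12"

def Spec_GetTheCases (CasesText : String) (province : String) (LocalcasesNum : String) (out : String) : Prop := out = GetTheCases_alt CasesText province LocalcasesNum
instance (CasesText : String) (province : String) (LocalcasesNum : String) (out : String) : Decidable (Spec_GetTheCases CasesText province LocalcasesNum out) := by unfold Spec_GetTheCases; infer_instance

-- ===== CLAIM (what is proved, stated in full; the proofs are below) =====
def Claim_equal_GetTheCases : Prop := ∀ (CasesText : String) (province : String) (LocalcasesNum : String), Dom_GetTheCases CasesText province LocalcasesNum → Pre_GetTheCases CasesText province LocalcasesNum → Spec_GetTheCases CasesText province LocalcasesNum (GetTheCases CasesText province LocalcasesNum)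
def Claim_raises_GetTheCases : Prop := (∀ (CasesText : String) (province : String) (LocalcasesNum : String), Dom_GetTheCases CasesText province LocalcasesNum → Raises_GetTheCases CasesText province LocalcasesNum → ¬ Pre_GetTheCases CasesText province LocalcasesNum) ∧ (Dom_GetTheCases (pvRaiseWitness_GetTheCases.1) (pvRaiseWitness_GetTheCases.2.1) (pvRaiseWitness_GetTheCases.2.2) ∧ Raises_GetTheCases (pvRaiseWitness_GetTheCases.1) (pvRaiseWitness_GetTheCases.2.1) (pvRaiseWitness_GetTheCases.2.2) ∧ GetTheCases_alt (pvRaiseWitness_GetTheCases.1) (pvRaiseWitness_GetTheCases.2.1) (pvRaiseWitness_GetTheCases.2.2) = pvRaiseWitnessOut_GetTheCases)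

-- ===== LEMMAS AND PROOFS =====

-- A's inner loop builds the window of length n starting at i
theorem pvBuildA_eq_take (cs : List Char) (n : Nat) : ∀ i, i + n ≤ cs.length →
    pvBuildA cs i n = (cs.drop i).take n := by
  induction n with
  | zero => intro i _; simp [pvBuildA]
  | succ n ih =>
    intro i h
    have hi : i < cs.length := by omega
    rw [List.drop_eq_getElem_cons hi]
    simp only [pvBuildA, List.take_succ_cons]
    rw [List.getD_eq_getElem cs ' ' hi, ih (i + 1) (by omega)]

-- the two digit scans agree (B scans the dropped suffix structurally)
theorem pvScanA_eq_pvScanB (cs : List Char) (j : Nat) : pvScanA cs j = pvScanB (cs.drop j) := by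
  by_cases h : j < cs.length
  · rw [List.drop_eq_getElem_cons h]
    rw [pvScanA]
    simp only [h, dif_pos]
    have ih := pvScanA_eq_pvScanB cs (j + 1)
    by_cases hd : '0' ≤ cs[j] ∧ cs[j] ≤ '9'
    · simp [hd, pvScanB, PySem.Chars.isdigit, ih]
    · have : PySem.Chars.isdigit cs[j] = false := by
        simp [PySem.Chars.isdigit]
        intro h1
        rcases not_and_or.mp hd with h2 | h2
        · exact absurd h1 h2
        · exact lt_of_not_ge h2
      simp [hd, pvScanB, this]
  · have : cs.drop j = [] := List.drop_eq_nil_of_le (by omega)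
    rw [pvScanA]
    simp [h, this, pvScanB]
termination_by cs.length - j

-- outer loop: no match anywhere at or after i ⇒ the loop falls through and returns ""
theorem pvOuterA_no_match (cs ps : List Char) (loc : String) :
    ∀ fuel i, i + fuel = cs.length + 1 - ps.length →
    (∀ j, ¬ ps <+: cs.drop j) → pvOuterA cs ps loc i fuel = "" := by
  intro fuel
  induction fuel with
  | zero => intro i _ _; simp [pvOuterA]
  | succ fuel ih =>
    intro i hinv hno
    have hlen : i + ps.length ≤ cs.length := by omega
    rw [pvOuterA]
    have hne : pvBuildA cs i ps.length ≠ ps := by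
      rw [pvBuildA_eq_take cs ps.length i hlen]
      intro he
      exact hno i (List.prefix_iff_eq_take.mpr he.symm)
    rw [if_neg hne]
    exact ih (i + 1) (by omega) hno

-- outer loop: first match at m ⇒ the loop stops there with A's matched-branch value
theorem pvOuterA_first_match (cs ps : List Char) (loc : String) (m : Nat)
    (hmle : m ≤ cs.length) (hm : ps <+: cs.drop m) (hfirst : ∀ j, j < m → ¬ ps <+: cs.drop j) :
    ∀ fuel i, i + fuel = cs.length + 1 - ps.length → i ≤ m →
    pvOuterA cs ps loc i fuel =
      (if (if m + ps.length < cs.length then pvScanA cs (m + ps.length) else []) = []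
       then loc
       else String.ofList (if m + ps.length < cs.length then pvScanA cs (m + ps.length) else [])) := by
  have hmlen : m + ps.length ≤ cs.length := by
    have := hm.length_le
    simp only [List.length_drop] at this
    omega
  intro fuel
  induction fuel with
  | zero =>
    intro i hinv him
    exfalso
    -- i = cs.length + 1 - ps.length > cs.length - ps.length ≥ m, contradiction with i ≤ m
    omega
  | succ fuel ih =>
    intro i hinv him
    have hlen : i + ps.length ≤ cs.length := by omega
    rw [pvOuterA]
    by_cases hi : i = m
    · subst hi
      have heq : pvBuildA cs i ps.length = ps := by
        rw [pvBuildA_eq_take cs ps.length i hlen]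
        exact (List.prefix_iff_eq_take.mp hm).symm
      rw [if_pos heq]
    · have hne : pvBuildA cs i ps.length ≠ ps := by
        rw [pvBuildA_eq_take cs ps.length i hlen]
        intro he
        exact hfirst i (by omega) (List.prefix_iff_eq_take.mpr he.symm)
      rw [if_neg hne]
      exact ih (i + 1) (by omega) (by omega)
-- ===== VERDICT helper =====

theorem GetTheCases_eq (CasesText province LocalcasesNum : String) :
    GetTheCases CasesText province LocalcasesNum = GetTheCases_alt CasesText province LocalcasesNum := by
  unfold GetTheCases GetTheCases_alt
  simp only [PySem.Str.find_eq]
  set cs := CasesText.toList with hcs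
  set ps := province.toList with hps
  by_cases hf : PySem.Chars.find cs ps = -1
  · -- no occurrence: A's loop falls through, B returns ""
    have hno : ∀ j, ¬ ps <+: cs.drop j := by
      intro j hj
      have : PySem.Chars.isIn ps cs = true := (PySem.Chars.exists_prefix_drop_iff_isIn ps cs).mp ⟨j, hj⟩
      rw [PySem.Chars.isIn_iff_infix] at this
      exact (PySem.Chars.find_eq_neg_one_iff cs ps).mp hf this
    simp only [hf, if_pos]
    exact pvOuterA_no_match cs ps LocalcasesNum _ 0 (by omega) hno
  · have hpos : 0 ≤ PySem.Chars.find cs ps := by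
      rw [PySem.Chars.find_nonneg_iff]
      exact (PySem.Chars.find_ne_neg_one_iff cs ps).mp hf
    obtain ⟨hpre, hfirst⟩ := PySem.Chars.find_spec (s := cs) (sub := ps) hpos
    set m := (PySem.Chars.find cs ps).toNat with hm
    have hmle : m ≤ cs.length := by
      have := PySem.Chars.find_le_length cs ps
      omega
    have hmain := pvOuterA_first_match cs ps LocalcasesNum m hmle hpre hfirst
        (cs.length + 1 - ps.length) 0 (by omega) (Nat.zero_le m)
    simp only [hf, if_false]
    rw [hmain, pvScanA_eq_pvScanB cs (m + ps.length)]
    by_cases hk : m + ps.length < cs.length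
    · simp [hk]
    · have : cs.drop (m + ps.length) = [] := List.drop_eq_nil_of_le (by omega)
      simp [hk, this, pvScanB]

-- ===== VERDICT (by name: the statement is the Claim_ definition above) =====
theorem GetTheCases_spec : Claim_equal_GetTheCases := by
  intro CasesText province LocalcasesNum _ _
  unfold Spec_GetTheCases
  exact GetTheCases_eq CasesText province LocalcasesNum

theorem GetTheCases_raises : Claim_raises_GetTheCases := by
  unfold Claim_raises_GetTheCases
  constructor
  · intro CasesText province LocalcasesNum _ hr hp
    exact hp hr
  · exact ⟨by decide, by decide, by decide⟩

-- self-check: the raise region of the witness really lies outside Pre_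
theorem GetTheCases_raises_witness_ok : ¬ Pre_GetTheCases (pvRaiseWitness_GetTheCases.1) (pvRaiseWitness_GetTheCases.2.1) (pvRaiseWitness_GetTheCases.2.2) :=
  GetTheCases_raises.1 _ _ _ (by decide) (by decide)
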